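-- pv_equiv track=rewrite | github.com/Hossein830417/TrdBot | bot.py | aggregate_signals
-- ===== SOURCE A (Python) =====
-- def aggregate_signals(signals):
--     buy_count = sum(1 for s in signals.values() if s == 'buy')
--     sell_count = sum(1 for s in signals.values() if s == 'sell')
--
--     if buy_count >= 2:
--         return 'buy'
--     elif sell_count >= 2:
--         return 'sell'
--     return None
-- ===== SOURCE B (Python) =====
-- def aggregate_signals(signals):
--     buys = 0
--     sells = 0
--     for s in signals.values():
--         if s == 'buy':
--             buys += 1
--             if buys == 2:
--                 return 'buy'
--         elif s == 'sell':
--             sells += 1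
--     return 'sell' if sells >= 2 else None
-- ===== Notes on version B (the rewrite author's own statement) =====
-- stated objective: alternative
-- what changed: Replaces A's two staged full filtered-sum scans with a single merged pass carrying two accumulators that short-circuits and returns 'buy' the moment the second 'buy' is seen, deferring only the sell decision to the end.
import Mathlib
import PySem

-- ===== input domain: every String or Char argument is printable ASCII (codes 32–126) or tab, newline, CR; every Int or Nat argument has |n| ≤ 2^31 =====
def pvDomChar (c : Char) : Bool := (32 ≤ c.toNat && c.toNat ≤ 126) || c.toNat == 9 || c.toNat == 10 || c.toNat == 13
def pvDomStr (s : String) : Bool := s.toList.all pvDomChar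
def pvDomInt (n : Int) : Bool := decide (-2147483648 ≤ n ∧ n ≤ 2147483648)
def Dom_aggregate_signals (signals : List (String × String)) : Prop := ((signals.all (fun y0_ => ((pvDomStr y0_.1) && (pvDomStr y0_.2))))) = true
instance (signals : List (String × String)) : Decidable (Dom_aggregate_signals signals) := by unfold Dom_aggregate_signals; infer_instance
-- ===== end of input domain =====

-- B replaces A's two staged full scans with one merged early-exit pass that returns 'buy' on the second 'buy' (alternative decomposition, same cost).

-- ===== PORT A =====
-- sum(1 for s in signals.values() if s == 'buy') / same for 'sell', then branch
def aggregate_signals (signals : List (String × String)) : Option String :=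
  let vals := (PySem.Dict.mk signals).values
  let buy_count : Int := vals.foldl (fun acc s => if s == "buy" then acc + 1 else acc) 0
  let sell_count : Int := vals.foldl (fun acc s => if s == "sell" then acc + 1 else acc) 0
  if buy_count ≥ 2 then some "buy"
  else if sell_count ≥ 2 then some "sell"
  else none

-- ===== PORT B =====
-- for s in values: count buys and sells, return 'buy' immediately when buys hits 2; at the end decide sell
def pvGoB : List String → Int → Int → Option String
  | [], _, sells => if sells ≥ 2 then some "sell" else none
  | s :: rest, buys, sells =>
    if s == "buy" then
      if buys + 1 == 2 then some "buy" else pvGoB rest (buys + 1) sells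
    else if s == "sell" then pvGoB rest buys (sells + 1)
    else pvGoB rest buys sells

def aggregate_signals_alt (signals : List (String × String)) : Option String :=
  pvGoB (PySem.Dict.mk signals).values 0 0

-- ===== PRECONDITION & SPEC =====
def Spec_aggregate_signals (signals : List (String × String)) (out : Option String) : Prop := out = aggregate_signals_alt signals
instance (signals : List (String × String)) (out : Option String) : Decidable (Spec_aggregate_signals signals out) := by unfold Spec_aggregate_signals; infer_instance

-- ===== CLAIM (what is proved, stated in full; the proofs are below) =====
def Claim_equal_aggregate_signals : Prop := ∀ (signals : List (String × String)), Dom_aggregate_signals signals → Spec_aggregate_signals signals (aggregate_signals signals)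

-- ===== LEMMAS AND PROOFS =====
-- A's filtered sum over a list equals the element count (as an Int).
theorem pv_foldl_if_count (v : String) : ∀ (l : List String) (acc : Int),
    l.foldl (fun acc s => if s == v then acc + 1 else acc) acc = acc + l.count v := by
  intro l
  induction l with
  | nil => intro acc; simp [List.count]
  | cons x xs ih =>
    intro acc
    rw [List.foldl_cons, ih, List.count_cons]
    by_cases h : x = v <;> simp [h] <;> omega

-- B's early-exit loop, started below the buy threshold, computes A's staged-scan answer.
theorem pvGoB_eq : ∀ (l : List String) (buys sells : Int), buys < 2 →
    pvGoB l buys sells =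
      (if buys + (l.count "buy" : Int) ≥ 2 then some "buy"
       else if sells + (l.count "sell" : Int) ≥ 2 then some "sell"
       else none) := by
  intro l
  induction l with
  | nil => intro buys sells h; simp [pvGoB]; omega
  | cons x xs ih =>
    intro buys sells h
    by_cases hb : x = "buy"
    · subst hb
      by_cases h2 : buys + 1 = 2
      · simp [pvGoB, h2, List.count_cons]
        omega
      · rw [show pvGoB ("buy" :: xs) buys sells = pvGoB xs (buys + 1) sells by
            simp [pvGoB, h2]]
        rw [ih _ _ (by omega)]
        simp [List.count_cons]
        split_ifs <;> first | rfl | omega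
    · by_cases hs : x = "sell"
      · subst hs
        rw [show pvGoB ("sell" :: xs) buys sells = pvGoB xs buys (sells + 1) by
            simp [pvGoB]]
        rw [ih _ _ h]
        simp [List.count_cons]
        split_ifs <;> first | rfl | omega
      · rw [show pvGoB (x :: xs) buys sells = pvGoB xs buys sells by
            simp [pvGoB, hb, hs]]
        rw [ih _ _ h]
        simp [List.count_cons, hb, hs]

-- ===== VERDICT (by name: the statement is the Claim_ definition above) =====
theorem aggregate_signals_spec : Claim_equal_aggregate_signals := by
  intro signals _
  unfold Spec_aggregate_signals aggregate_signals aggregate_signals_alt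
  rw [pvGoB_eq _ 0 0 (by omega)]
  simp only [pv_foldl_if_count, zero_add]
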